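-- pv_equiv track=rewrite | github.com/sarahmoussaoui/Information-Retrival-Project | SourceCode/src/dataset/parser.py | parse_documents
-- ===== SOURCE A (Python) =====
-- def parse_documents(raw_text: str) -> dict[int, str]:
--     """Parse MED.ALL contents into a structured list.
--
--     Args:
--         raw_text: The full text content of MED.ALL file
--
--     Returns:
--         dict[int, str]: Mapping of doc_id to document_text
--     """
--     documents = {}
--     current_doc_id = None
--     current_text = []
--
--     for line in raw_text.split('\n'):
--         line = line.strip()
--
--         if line.startswith('.I '):
--             # Save previous document if exists
--             if current_doc_id is not None:
--                 documents[current_doc_id] = ' '.join(current_text).strip()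
--
--             # Start new document
--             current_doc_id = int(line[3:].strip())
--             current_text = []
--
--         elif line.startswith('.W'):
--             # Start of document text content
--             continue
--
--         elif line and not line.startswith('.'):
--             # Accumulate document text
--             current_text.append(line)
--
--     # Save last document
--     if current_doc_id is not None:
--         documents[current_doc_id] = ' '.join(current_text).strip()
--
--     return documents
-- ===== SOURCE B (Python) =====
-- def parse_documents(raw_text: str) -> dict[int, str]:
--     """Parse MED.ALL contents into a structured list.
--
--     Two-pass decomposition: first partition the stripped lines into
--     (doc_id, body_lines) blocks, then render each block into the dict.
--     """
--     # Pass 1: partition into blocks.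
--     blocks = []
--     for ln in raw_text.split('\n'):
--         ln = ln.strip()
--         if ln.startswith('.I '):
--             blocks.append((int(ln[3:].strip()), []))
--         elif blocks and ln and not ln.startswith('.'):
--             blocks[-1][1].append(ln)
--     # Pass 2: render each block.
--     return {doc_id: ' '.join(body).strip() for doc_id, body in blocks}
-- ===== Notes on version B (the rewrite author's own statement) =====
-- stated objective: alternative
-- what changed: A's single pass maintaining (dict, current_doc_id, current_text) with save-on-boundary logic is replaced by a two-pass decomposition: first partition the stripped lines into (doc_id, body_lines) blocks, then render all blocks into the dict with a comprehension.
import Mathlib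
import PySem

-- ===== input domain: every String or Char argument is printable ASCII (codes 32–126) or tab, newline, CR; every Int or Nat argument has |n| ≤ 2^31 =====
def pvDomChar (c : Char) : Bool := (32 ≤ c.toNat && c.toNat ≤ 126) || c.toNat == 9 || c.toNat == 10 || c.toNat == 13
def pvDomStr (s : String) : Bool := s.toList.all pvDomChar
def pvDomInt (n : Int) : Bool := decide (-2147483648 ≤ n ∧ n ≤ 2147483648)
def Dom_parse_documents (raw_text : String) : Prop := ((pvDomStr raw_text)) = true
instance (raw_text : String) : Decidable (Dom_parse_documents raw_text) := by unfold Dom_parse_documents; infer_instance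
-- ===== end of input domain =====

-- B replaces A's single pass with save-on-boundary state (dict, current id, current text)
-- by a two-pass decomposition: partition lines into (id, body) blocks, then render each block.


-- ===== PORT A =====
-- state: (documents, current_doc_id, current_text)
def pvStepA (st : PySem.Dict Int String × Option Int × List (List Char)) (line : List Char) :
    PySem.Dict Int String × Option Int × List (List Char) :=
  let l := PySem.Chars.strip line
  if PySem.Chars.startswith l ['.', 'I', ' '] then
    let d := match st.2.1 with
      | some cid => st.1.insert cid (String.ofList (PySem.Chars.strip (PySem.Chars.join [' '] st.2.2)))
      | none => st.1
    -- int() raises on a bad id; Pre_ excludes that, the total form uses .getD 0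
    (d, some ((PySem.Int.ofChars? (PySem.Chars.strip (PySem.List.slice l (some 3) none))).getD 0), [])
  else if PySem.Chars.startswith l ['.', 'W'] then st
  else if l ≠ [] ∧ ¬ PySem.Chars.startswith l ['.'] = true then (st.1, st.2.1, st.2.2 ++ [l])
  else st

-- "Save last document" and return
def pvFinishA (st : PySem.Dict Int String × Option Int × List (List Char)) : List (Int × String) :=
  (match st.2.1 with
   | some cid => st.1.insert cid (String.ofList (PySem.Chars.strip (PySem.Chars.join [' '] st.2.2)))
   | none => st.1).items

def parse_documents (raw_text : String) : List (Int × String) :=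
  pvFinishA ((PySem.Chars.splitOn raw_text.toList ['\n']).foldl pvStepA (PySem.Dict.empty, none, []))

-- ===== PORT B =====
-- blocks[-1][1].append(l) : append l to the body of the last block
def pvAppendLast (bs : List (Int × List (List Char))) (l : List Char) : List (Int × List (List Char)) :=
  match bs with
  | [] => []
  | [b] => [(b.1, b.2 ++ [l])]
  | b :: rest => b :: pvAppendLast rest l

def pvStepB (bs : List (Int × List (List Char))) (line : List Char) : List (Int × List (List Char)) :=
  let l := PySem.Chars.strip line
  if PySem.Chars.startswith l ['.', 'I', ' '] then
    bs ++ [((PySem.Int.ofChars? (PySem.Chars.strip (l.drop 3))).getD 0, [])]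
  else if bs ≠ [] ∧ l ≠ [] ∧ ¬ PySem.Chars.startswith l ['.'] = true then pvAppendLast bs l
  else bs

-- pass 2: the dict comprehension
def pvRenderD (bs : List (Int × List (List Char))) : PySem.Dict Int String :=
  bs.foldl (fun d b => d.insert b.1 (String.ofList (PySem.Chars.strip (PySem.Chars.join [' '] b.2)))) PySem.Dict.empty

def parse_documents_alt (raw_text : String) : List (Int × String) :=
  (pvRenderD ((PySem.Chars.splitOn raw_text.toList ['\n']).foldl pvStepB [])).items

-- ===== PRECONDITION & SPEC =====
-- Pre_ excludes exactly the inputs where Python A raises ValueError: a stripped line that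
-- starts with '.I ' whose remainder is not a valid int literal.
def Pre_parse_documents (raw_text : String) : Prop :=
  ∀ line ∈ PySem.Chars.splitOn raw_text.toList ['\n'],
    PySem.Chars.startswith (PySem.Chars.strip line) ['.', 'I', ' '] = true →
    (PySem.Int.ofChars? (PySem.Chars.strip ((PySem.Chars.strip line).drop 3))).isSome = true
instance (raw_text : String) : Decidable (Pre_parse_documents raw_text) := by
  unfold Pre_parse_documents; infer_instance

def pvWitness_parse_documents : String := ".I 1\n.W\nhello world\n.I 2\n.W\nsecond doc"

def Spec_parse_documents (raw_text : String) (out : List (Int × String)) : Prop := out = parse_documents_alt raw_text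
instance (raw_text : String) (out : List (Int × String)) : Decidable (Spec_parse_documents raw_text out) := by unfold Spec_parse_documents; infer_instance

-- ===== CLAIM (what is proved, stated in full; the proofs are below) =====
def Claim_equal_parse_documents : Prop := ∀ (raw_text : String), Dom_parse_documents raw_text → Pre_parse_documents raw_text → Spec_parse_documents raw_text (parse_documents raw_text)

-- ===== LEMMAS AND PROOFS =====

-- the invariant tying A's running state to B's block list
def pvInv (st : PySem.Dict Int String × Option Int × List (List Char))
    (bs : List (Int × List (List Char))) : Prop :=
  (bs = [] ∧ st.1 = PySem.Dict.empty ∧ st.2.1 = none) ∨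
  (∃ bs' id, bs = bs' ++ [(id, st.2.2)] ∧ st.2.1 = some id ∧ st.1 = pvRenderD bs')

lemma pvAppendLast_append (bs : List (Int × List (List Char))) (p : Int × List (List Char))
    (l : List Char) : pvAppendLast (bs ++ [p]) l = bs ++ [(p.1, p.2 ++ [l])] := by
  induction bs with
  | nil => rfl
  | cons b rest ih =>
    cases rest with
    | nil => simp [pvAppendLast]
    | cons c cs => simp [pvAppendLast] at ih ⊢; exact ih

lemma pvRenderD_append (bs : List (Int × List (List Char))) (p : Int × List (List Char)) :
    pvRenderD (bs ++ [p]) =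
      (pvRenderD bs).insert p.1 (String.ofList (PySem.Chars.strip (PySem.Chars.join [' '] p.2))) := by
  simp [pvRenderD, List.foldl_append]

lemma pvSlice_drop (l : List Char) : PySem.List.slice l (some 3) none = l.drop 3 := by
  simp only [PySem.List.slice]
  rcases Nat.le_total 3 l.length with h | h
  · simp [Nat.min_eq_left h, List.take_of_length_le]
  · simp [Nat.min_eq_right h, List.drop_eq_nil_of_le h]

lemma pvStep_inv (st : PySem.Dict Int String × Option Int × List (List Char))
    (bs : List (Int × List (List Char))) (line : List Char) (h : pvInv st bs) :
    pvInv (pvStepA st line) (pvStepB bs line) := by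
  obtain ⟨d, i, t⟩ := st
  simp only [pvStepA, pvStepB]
  by_cases hI : PySem.Chars.startswith (PySem.Chars.strip line) ['.', 'I', ' '] = true
  · rw [if_pos hI, if_pos hI, pvSlice_drop]
    rcases h with ⟨hbs, hd, hi⟩ | ⟨bs', id, hbs, hi, hd⟩
    · simp only at hd hi
      subst hbs; subst hd; subst hi
      exact Or.inr ⟨[], _, rfl, rfl, rfl⟩
    · simp only at hi hd
      subst hi; subst hd; subst hbs
      exact Or.inr ⟨bs' ++ [(id, t)], _, rfl, rfl, by simp [pvRenderD_append]⟩
  · rw [if_neg hI, if_neg hI]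
    have hdot : PySem.Chars.startswith (PySem.Chars.strip line) ['.', 'W'] = true →
        PySem.Chars.startswith (PySem.Chars.strip line) ['.'] = true := by
      intro hw
      rw [PySem.Chars.startswith_iff] at hw ⊢
      exact List.IsPrefix.trans ⟨['W'], rfl⟩ hw
    by_cases hW : PySem.Chars.startswith (PySem.Chars.strip line) ['.', 'W'] = true
    · rw [if_pos hW, if_neg (fun hc => hc.2.2 (hdot hW))]
      exact h
    · rw [if_neg hW]
      by_cases hT : PySem.Chars.strip line ≠ [] ∧
          ¬ PySem.Chars.startswith (PySem.Chars.strip line) ['.'] = true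
      · rw [if_pos hT]
        rcases h with ⟨hbs, hd, hi⟩ | ⟨bs', id, hbs, hi, hd⟩
        · subst hbs
          rw [if_neg (fun hc => hc.1 rfl)]
          exact Or.inl ⟨rfl, hd, hi⟩
        · subst hbs
          rw [if_pos ⟨by simp, hT.1, hT.2⟩, pvAppendLast_append]
          simp only at hi hd
          exact Or.inr ⟨bs', id, rfl, hi, hd⟩
      · rw [if_neg hT, if_neg (fun hc => hT ⟨hc.2.1, hc.2.2⟩)]
        exact h

lemma pvFold_inv (lines : List (List Char))
    (st : PySem.Dict Int String × Option Int × List (List Char))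
    (bs : List (Int × List (List Char))) (h : pvInv st bs) :
    pvInv (lines.foldl pvStepA st) (lines.foldl pvStepB bs) := by
  induction lines generalizing st bs with
  | nil => exact h
  | cons l rest ih => exact ih _ _ (pvStep_inv st bs l h)

-- ===== VERDICT (by name: the statement is the Claim_ definition above) =====
theorem parse_documents_spec : Claim_equal_parse_documents := by
  intro raw_text _ _
  unfold Spec_parse_documents parse_documents parse_documents_alt
  have h := pvFold_inv (PySem.Chars.splitOn raw_text.toList ['\n'])
    (PySem.Dict.empty, none, []) [] (Or.inl ⟨rfl, rfl, rfl⟩)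
  revert h
  generalize (PySem.Chars.splitOn raw_text.toList ['\n']).foldl pvStepA
      (PySem.Dict.empty, none, []) = stf
  generalize (PySem.Chars.splitOn raw_text.toList ['\n']).foldl pvStepB [] = bsf
  intro h
  obtain ⟨d, i, t⟩ := stf
  rcases h with ⟨hbs, hd, hi⟩ | ⟨bs', id, hbs, hi, hd⟩
  · simp only at hd hi
    subst hbs; subst hd; subst hi
    rfl
  · simp only at hi hd
    subst hbs; subst hi; subst hd
    simp [pvFinishA, pvRenderD_append]
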